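-- pv_equiv track=rewrite | github.com/Joshua-Gordon/advent-of-code2021 | day12.py | search
-- ===== SOURCE A (Python) =====
-- def search(current, graph):
--     position = current[-1]
--     if position == 'end':
--         return []
--     fringe = []
--     for a,b in graph:
--         if position == a:
--             if b[0].islower() and b not in current:
--                 fringe.append(b)
--             elif b[0].isupper():
--                 fringe.append(b)
--         if position == b:
--             if a[0].islower() and a not in current:
--                 fringe.append(a)
--             elif a[0].isupper():
--                 fringe.append(a)
--     return [current + [f] for f in fringe]
-- ===== SOURCE B (Python) =====
-- def search(current, graph):
--     position = current[-1]
--     if position == 'end':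
--         return []
--     adj = {}
--     for a, b in graph:
--         for x, y in ((a, b), (b, a)):
--             adj.setdefault(x, []).append(y)
--     fringe = [f for f in adj.get(position, [])
--               if f[0].isupper() or (f[0].islower() and f not in current)]
--     return [current + [f] for f in fringe]
-- ===== Notes on version B (the rewrite author's own statement) =====
-- stated objective: idiomatic
-- what changed: B first builds an adjacency dict (node -> neighbor list in edge order, both directions, self-loops giving two entries) and then filters adj.get(position, []) with a single comprehension, instead of A's per-edge dual if-blocks appending into a fringe list.
import Mathlib
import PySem

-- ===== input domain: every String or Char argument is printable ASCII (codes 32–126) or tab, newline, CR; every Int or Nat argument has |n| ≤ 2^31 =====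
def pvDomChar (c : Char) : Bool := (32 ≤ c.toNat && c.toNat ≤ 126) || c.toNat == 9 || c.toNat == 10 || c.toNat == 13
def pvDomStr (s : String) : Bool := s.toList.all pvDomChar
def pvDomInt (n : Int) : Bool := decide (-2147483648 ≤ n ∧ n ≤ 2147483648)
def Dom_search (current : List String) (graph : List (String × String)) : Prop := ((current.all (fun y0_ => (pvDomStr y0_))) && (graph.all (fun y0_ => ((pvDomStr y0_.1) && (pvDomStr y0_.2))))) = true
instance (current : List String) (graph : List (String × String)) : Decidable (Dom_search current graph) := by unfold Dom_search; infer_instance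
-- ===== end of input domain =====

-- B builds an adjacency dict once and filters the position's neighbor list, instead of A's edge scan with dual if-blocks (idiomatic; same cost).

-- ===== PORT A =====
def search (current : List String) (graph : List (String × String)) : List (List String) :=
  match PySem.List.pyGet? current (-1) with
  | none => []          -- Python raises IndexError here; excluded by Pre_search
  | some position =>
    if position = "end" then []
    else
      let fringe := graph.foldl (fun fr p =>
        let fr :=
          if position = p.1 then
            match PySem.Str.pyGet? p.2 0 with
            | none => fr          -- Python raises IndexError here; excluded by Pre_search
            | some c =>
              if PySem.Chars.islower c && !(current.contains p.2) then fr ++ [p.2]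
              else if PySem.Chars.isupper c then fr ++ [p.2]
              else fr
          else fr
        if position = p.2 then
          match PySem.Str.pyGet? p.1 0 with
          | none => fr            -- Python raises IndexError here; excluded by Pre_search
          | some c =>
            if PySem.Chars.islower c && !(current.contains p.1) then fr ++ [p.1]
            else if PySem.Chars.isupper c then fr ++ [p.1]
            else fr
        else fr) []
      fringe.map (fun f => current ++ [f])

-- ===== PORT B =====
-- the comprehension's filter condition on a neighbor f
def keepNbr (current : List String) (f : String) : Bool :=
  match PySem.Str.pyGet? f 0 with
  | none => false       -- Python raises IndexError here; excluded by Pre_search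
  | some c => PySem.Chars.isupper c || (PySem.Chars.islower c && !(current.contains f))

def search_alt (current : List String) (graph : List (String × String)) : List (List String) :=
  match PySem.List.pyGet? current (-1) with
  | none => []          -- Python raises IndexError here; excluded by Pre_search
  | some position =>
    if position = "end" then []
    else
      let adj := graph.foldl (fun d p =>
        [(p.1, p.2), (p.2, p.1)].foldl
          (fun d q => d.modify q.1 [] (fun l => l ++ [q.2])) d) PySem.Dict.empty
      let fringe := (adj.getD position []).filter (keepNbr current)
      fringe.map (fun f => current ++ [f])

-- ===== PRECONDITION & SPEC =====
-- Pre_ excludes exactly the inputs where Python A raises IndexError: an empty current, and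
-- (when the position is not 'end') a graph edge that pairs the position with an empty-string node.
def Pre_search (current : List String) (graph : List (String × String)) : Prop :=
  current ≠ [] ∧
  (current.getLastD "" = "end" ∨
    ∀ p ∈ graph, (p.1 = current.getLastD "" → p.2 ≠ "") ∧ (p.2 = current.getLastD "" → p.1 ≠ ""))
instance (current : List String) (graph : List (String × String)) : Decidable (Pre_search current graph) := by unfold Pre_search; infer_instance

def pvWitness_search : List String × (List (String × String)) :=
  (["start", "a"], [("start", "a"), ("a", "BB"), ("a", "end")])

def Spec_search (current : List String) (graph : List (String × String)) (out : List (List String)) : Prop := out = search_alt current graph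
instance (current : List String) (graph : List (String × String)) (out : List (List String)) : Decidable (Spec_search current graph out) := by unfold Spec_search; infer_instance

-- ===== CLAIM (what is proved, stated in full; the proofs are below) =====
def Claim_equal_search : Prop := ∀ (current : List String) (graph : List (String × String)), Dom_search current graph → Pre_search current graph → Spec_search current graph (search current graph)

-- ===== LEMMAS AND PROOFS =====

-- the neighbors of `pos` contributed by one edge, in A's append order
def nbrs (pos : String) (p : String × String) : List String :=
  (if pos = p.1 then [p.2] else []) ++ (if pos = p.2 then [p.1] else [])

-- one conditional append of A equals appending the filtered singleton
theorem stepA (current : List String) (l : List String) (n : String) :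
    (match PySem.Str.pyGet? n 0 with
     | none => l
     | some c =>
       if PySem.Chars.islower c && !(current.contains n) then l ++ [n]
       else if PySem.Chars.isupper c then l ++ [n]
       else l)
    = l ++ (if keepNbr current n then [n] else []) := by
  unfold keepNbr
  cases h : PySem.Str.pyGet? n 0 with
  | none => simp
  | some c =>
    by_cases hl : (PySem.Chars.islower c && !(current.contains n)) = true <;>
      by_cases hu : PySem.Chars.isupper c = true <;> simp_all <;> split_ifs <;> simp_all

-- B's adjacency lookup is exactly the concatenated per-edge neighbor lists
theorem adj_getD (pos : String) (graph : List (String × String))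
    (d : PySem.Dict String (List String)) :
    (graph.foldl (fun d p =>
        [(p.1, p.2), (p.2, p.1)].foldl
          (fun d q => d.modify q.1 [] (fun l => l ++ [q.2])) d) d).getD pos []
      = d.getD pos [] ++ graph.flatMap (nbrs pos) := by
  induction graph generalizing d with
  | nil => simp
  | cons p rest ih =>
    rw [List.foldl_cons, ih]
    clear ih
    simp only [List.foldl_cons, List.foldl_nil, PySem.Dict.getD_modify,
      List.flatMap_cons, nbrs]
    split_ifs <;> simp_all [List.append_assoc]

-- A's fringe loop is the filtered concatenation of the per-edge neighbor lists
theorem fringe_eq (pos : String) (current : List String) (graph : List (String × String))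
    (fr : List String) :
    graph.foldl (fun fr p =>
        let fr :=
          if pos = p.1 then
            match PySem.Str.pyGet? p.2 0 with
            | none => fr
            | some c =>
              if PySem.Chars.islower c && !(current.contains p.2) then fr ++ [p.2]
              else if PySem.Chars.isupper c then fr ++ [p.2]
              else fr
          else fr
        if pos = p.2 then
          match PySem.Str.pyGet? p.1 0 with
          | none => fr
          | some c =>
            if PySem.Chars.islower c && !(current.contains p.1) then fr ++ [p.1]
            else if PySem.Chars.isupper c then fr ++ [p.1]
            else fr
        else fr) fr
      = fr ++ (graph.flatMap (nbrs pos)).filter (keepNbr current) := by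
  induction graph generalizing fr with
  | nil => simp
  | cons p rest ih =>
    rw [List.foldl_cons, ih]
    clear ih
    simp only [stepA, List.flatMap_cons, List.filter_append, nbrs]
    split_ifs <;> simp_all [List.append_assoc, List.filter]

-- ===== VERDICT (by name: the statement is the Claim_ definition above) =====
theorem search_spec : Claim_equal_search := by
  intro current graph _ _
  unfold Spec_search search search_alt
  cases hp : PySem.List.pyGet? current (-1) with
  | none => rfl
  | some position =>
    by_cases he : position = "end"
    · simp [he]
    · simp only [he, ite_false]
      rw [fringe_eq, adj_getD]
      simp
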